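-- pv_equiv track=rewrite | github.com/Tori-W/vh-glenn-quest | cogs/quests.py | make_quest_db_entry
-- ===== SOURCE A (Python) =====
-- def make_quest_db_entry(quests):
--     quest_statement = ""
--     for i in range(len(quests)):
--         if (i == 0):
--             quest_statement = quests[i]
--         elif (i == (len(quests) - 1)):
--             quest_statement = quest_statement + ", and " + quests[i].lower() + "."
--         else:
--             quest_statement = quest_statement + ", " + quests[i].lower()
--     return quest_statement
-- ===== SOURCE B (Python) =====
-- def make_quest_db_entry(quests):
--     if not quests:
--         return ""
--     if len(quests) == 1:
--         return quests[0]
--     sentence = ", and " + quests[-1].lower() + "."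
--     for q in reversed(quests[1:-1]):
--         sentence = ", " + q.lower() + sentence
--     return quests[0] + sentence
-- ===== Notes on version B (the rewrite author's own statement) =====
-- stated objective: simpler
-- what changed: Replaces the index-branching accumulator loop (testing each i against 0 and len-1) with explicit length guards and a back-to-front build: start from ', and <last>.', prepend ', <q>' for the middle elements in reverse, then prepend the verbatim first quest.
import Mathlib
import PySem

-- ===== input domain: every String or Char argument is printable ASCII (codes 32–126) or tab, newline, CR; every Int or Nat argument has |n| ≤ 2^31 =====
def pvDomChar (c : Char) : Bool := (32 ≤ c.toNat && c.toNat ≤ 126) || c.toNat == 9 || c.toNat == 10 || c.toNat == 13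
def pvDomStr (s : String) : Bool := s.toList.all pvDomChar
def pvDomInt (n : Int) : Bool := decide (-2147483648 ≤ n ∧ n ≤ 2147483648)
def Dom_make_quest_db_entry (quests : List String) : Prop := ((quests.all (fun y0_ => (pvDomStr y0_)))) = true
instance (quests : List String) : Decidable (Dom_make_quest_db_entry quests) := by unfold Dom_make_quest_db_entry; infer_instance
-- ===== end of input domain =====

-- B replaces A's index-branching accumulator loop with explicit length guards and a back-to-front build of the sentence (objective: simpler).

-- ===== PORT A =====
def make_quest_db_entry (quests : List String) : String :=
  (PySem.List.pyRange 0 (quests.length : Int) 1).foldl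
    (fun quest_statement i =>
      if i == 0 then PySem.List.pyGetD quests i ""
      else if i == (quests.length : Int) - 1 then
        quest_statement ++ ", and " ++ PySem.Str.lower (PySem.List.pyGetD quests i "") ++ "."
      else
        quest_statement ++ ", " ++ PySem.Str.lower (PySem.List.pyGetD quests i "")) ""

-- ===== PORT B =====
def make_quest_db_entry_alt (quests : List String) : String :=
  if quests.length == 0 then ""
  else if quests.length == 1 then PySem.List.pyGetD quests 0 ""
  else
    let sentence0 := ", and " ++ PySem.Str.lower (PySem.List.pyGetD quests (-1) "") ++ "."
    let sentence := ((PySem.List.slice quests (some 1) (some (-1))).reverse).foldl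
        (fun sentence q => ", " ++ PySem.Str.lower q ++ sentence) sentence0
    PySem.List.pyGetD quests 0 "" ++ sentence

-- ===== PRECONDITION & SPEC =====
def Spec_make_quest_db_entry (quests : List String) (out : String) : Prop := out = make_quest_db_entry_alt quests
instance (quests : List String) (out : String) : Decidable (Spec_make_quest_db_entry quests out) := by unfold Spec_make_quest_db_entry; infer_instance

-- ===== CLAIM (what is proved, stated in full; the proofs are below) =====
def Claim_equal_make_quest_db_entry : Prop := ∀ (quests : List String), Dom_make_quest_db_entry quests → Spec_make_quest_db_entry quests (make_quest_db_entry quests)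

-- ===== LEMMAS AND PROOFS =====

-- proof-side closed form of the sentence suffix after the first quest
def tailPart : List String → String
  | [] => ""
  | [b] => ", and " ++ PySem.Str.lower b ++ "."
  | q :: rest => ", " ++ PySem.Str.lower q ++ tailPart rest

-- the loop body of A, as a named function
def pvStepA (quests : List String) (quest_statement : String) (i : Int) : String :=
  if i == 0 then PySem.List.pyGetD quests i ""
  else if i == (quests.length : Int) - 1 then
    quest_statement ++ ", and " ++ PySem.Str.lower (PySem.List.pyGetD quests i "") ++ "."
  else
    quest_statement ++ ", " ++ PySem.Str.lower (PySem.List.pyGetD quests i "")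

-- invariant: from index k ≥ 1 on, A's loop appends exactly tailPart (quests.drop k)
theorem pvFoldTail (quests : List String) :
    ∀ (d : List String) (k : Nat) (acc : String), quests.drop k = d → 1 ≤ k →
      (PySem.List.pyRange (k : Int) (quests.length : Int) 1).foldl (pvStepA quests) acc
        = acc ++ tailPart d := by
  intro d
  induction d with
  | nil =>
    intro k acc hd _
    have hlen : quests.length ≤ k := by
      have := List.drop_eq_nil_iff.mp hd
      omega
    rw [PySem.List.pyRange_one_eq_nil (by exact_mod_cast hlen)]
    simp [tailPart]
  | cons q rest ih =>
    intro k acc hd hk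
    have hklt : k < quests.length := by
      have h1 : (quests.drop k).length = quests.length - k := List.length_drop ..
      rw [hd] at h1; simp at h1; omega
    have hget : quests[k] = q := by
      have : (quests.drop k)[0]'(by rw [hd]; simp) = quests[k + 0] := List.getElem_drop ..
      simpa [hd] using this.symm
    have hdrop1 : quests.drop (k + 1) = rest := by
      have : List.drop 1 (quests.drop k) = quests.drop (k + 1) := by
        rw [List.drop_drop]
      rw [← this, hd]; simp
    rw [PySem.List.pyRange_one_cons (by exact_mod_cast hklt)]
    simp only [List.foldl_cons]
    have hstep0 : ((k : Int) == 0) = false := by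
      simp only [beq_eq_false_iff_ne]; exact_mod_cast (by omega : k ≠ 0)
    have hgetD : PySem.List.pyGetD quests (k : Int) "" = q := by
      rw [PySem.List.pyGetD_natCast]
      simpa [List.getD, hklt] using hget
    cases rest with
    | nil =>
      -- k is the last index
      have hlen : quests.length = k + 1 := by
        have h1 : (quests.drop k).length = quests.length - k := List.length_drop ..
        rw [hd] at h1; simp at h1; omega
      have hlast : ((k : Int) == (quests.length : Int) - 1) = true := by
        simp only [beq_iff_eq]; rw [hlen]; push_cast; ring
      have hnil : PySem.List.pyRange ((k : Int) + 1) (quests.length : Int) 1 = [] := by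
        apply PySem.List.pyRange_one_eq_nil; rw [hlen]; push_cast; omega
      rw [show ((k : Int) + 1) = (((k + 1 : Nat)) : Int) by push_cast; ring] at hnil
      simp only [pvStepA, hstep0, hlast, if_true, hgetD]
      rw [show ((k : Int) + 1) = (((k + 1 : Nat)) : Int) by push_cast; ring, hnil]
      simp [tailPart, String.append_assoc]
    | cons b rest' =>
      have hlen2 : k + 1 < quests.length := by
        have h1 : (quests.drop k).length = quests.length - k := List.length_drop ..
        rw [hd] at h1; simp at h1; omega
      have hlast : ((k : Int) == (quests.length : Int) - 1) = false := by
        simp only [beq_eq_false_iff_ne]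
        intro h; omega
      simp only [pvStepA, hstep0, hlast, hgetD]
      rw [show ((k : Int) + 1) = (((k + 1 : Nat)) : Int) by push_cast; ring]
      rw [ih (k + 1) _ hdrop1 (by omega)]
      simp [tailPart, String.append_assoc]

-- A in closed form: first quest verbatim, then tailPart of the rest
theorem pvA_closed (a : String) (rest : List String) :
    make_quest_db_entry (a :: rest) = a ++ tailPart rest := by
  unfold make_quest_db_entry
  have hpos : (0 : Int) < (((a :: rest).length : Nat) : Int) := by simp
  rw [PySem.List.pyRange_one_cons hpos]
  simp only [List.foldl_cons]
  have h0 : pvStepA (a :: rest) "" 0 = a := by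
    simp [pvStepA, PySem.List.pyGetD]
  have := pvFoldTail (a :: rest) rest 1 a (by simp) (by omega)
  rw [show ((0 : Int) + 1) = ((1 : Nat) : Int) by norm_num]
  show (PySem.List.pyRange ((1 : Nat) : Int) ((a :: rest).length : Int) 1).foldl
      (pvStepA (a :: rest)) (pvStepA (a :: rest) "" 0) = a ++ tailPart rest
  rw [h0, this]

-- tailPart unfolds at a cons whose tail is nonempty
theorem tailPart_cons_append (q b : String) (mid : List String) :
    tailPart (q :: (mid ++ [b])) = ", " ++ PySem.Str.lower q ++ tailPart (mid ++ [b]) := by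
  cases mid <;> simp [tailPart]

-- B's backwards loop computes tailPart when the suffix ends in b
theorem pvFoldRev (mid : List String) (b : String) :
    mid.reverse.foldl (fun sentence q => ", " ++ PySem.Str.lower q ++ sentence)
      (", and " ++ PySem.Str.lower b ++ ".") = tailPart (mid ++ [b]) := by
  induction mid with
  | nil => simp [tailPart]
  | cons q mid ih =>
    rw [List.reverse_cons, List.foldl_append, ih]
    simp only [List.foldl_cons, List.foldl_nil, List.cons_append, tailPart_cons_append]

-- quests[1:-1] of a :: mid ++ [b] is mid
theorem pvSliceMid (a b : String) (mid : List String) :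
    PySem.List.slice (a :: (mid ++ [b])) (some 1) (some (-1)) = mid := by
  simp [PySem.List.slice, PySem.List.clampIdx]
  rw [if_neg (by omega)]
  simp

-- ===== VERDICT (by name: the statement is the Claim_ definition above) =====
theorem make_quest_db_entry_spec : Claim_equal_make_quest_db_entry := by
  intro quests _
  unfold Spec_make_quest_db_entry make_quest_db_entry_alt
  cases quests with
  | nil => simp [make_quest_db_entry, PySem.List.pyRange_one_eq_nil]
  | cons a rest =>
    rw [pvA_closed]
    rcases List.eq_nil_or_concat' rest with h | ⟨mid, b, h⟩
    · subst h; simp [tailPart, PySem.List.pyGetD]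
    · subst h
      rw [if_neg (by simp), if_neg (by simp)]
      show a ++ tailPart (mid ++ [b])
          = PySem.List.pyGetD (a :: (mid ++ [b])) 0 "" ++
            ((PySem.List.slice (a :: (mid ++ [b])) (some 1) (some (-1))).reverse).foldl
              (fun sentence q => ", " ++ PySem.Str.lower q ++ sentence)
              (", and " ++ PySem.Str.lower (PySem.List.pyGetD (a :: (mid ++ [b])) (-1) "") ++ ".")
      rw [pvSliceMid, pvFoldRev]
      have hlast : PySem.List.pyGetD (a :: (mid ++ [b])) (-1) "" = b := by
        simp [pysem]
      have h0 : PySem.List.pyGetD (a :: (mid ++ [b])) 0 "" = a := by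
        simp [PySem.List.pyGetD]
      rw [hlast, h0]
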